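-- pv_equiv track=rewrite | github.com/guidj/drmdp-fnapprox | src/drmdp/tiles.py | pow2geq
-- ===== SOURCE A (Python) =====
-- def pow2geq(lb: int) -> int:
--     exp = 1
--     rs = 1
--     while True:
--         rs = 2**exp
--         if rs >= lb:
--             break
--         exp += 1
--     return rs
-- ===== SOURCE B (Python) =====
-- def pow2geq(lb: int) -> int:
--     if lb <= 2:
--         return 2
--     return 1 << (lb - 1).bit_length()
-- ===== Notes on version B (the rewrite author's own statement) =====
-- stated objective: idiomatic
-- what changed: Replaced the doubling loop with a closed-form bit-length computation (guarding the min-2 floor for lb <= 2).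
import Mathlib
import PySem

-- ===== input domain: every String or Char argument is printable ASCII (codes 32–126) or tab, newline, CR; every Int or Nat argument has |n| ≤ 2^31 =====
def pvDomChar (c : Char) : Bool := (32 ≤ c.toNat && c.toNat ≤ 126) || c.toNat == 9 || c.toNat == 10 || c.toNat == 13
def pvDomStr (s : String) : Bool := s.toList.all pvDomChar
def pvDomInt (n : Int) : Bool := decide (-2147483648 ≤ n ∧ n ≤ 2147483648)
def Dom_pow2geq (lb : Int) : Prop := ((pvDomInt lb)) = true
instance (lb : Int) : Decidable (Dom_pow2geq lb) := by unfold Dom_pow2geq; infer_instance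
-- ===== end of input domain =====

-- B replaces A's doubling loop by a closed-form bit-length computation (guarded min-2 floor); objective: idiomatic.


-- ===== PORT A =====
-- the 'while True' loop: rs = 2**exp; break when rs >= lb, else exp += 1
def pow2geqLoop (lb : Int) (exp : Nat) : Int :=
  let rs : Int := 2 ^ exp
  if rs ≥ lb then rs else pow2geqLoop lb (exp + 1)
termination_by (lb - 2 ^ exp).toNat
decreasing_by
  have h2 : (0:Int) < 2 ^ exp := by positivity
  omega

def pow2geq (lb : Int) : Int := pow2geqLoop lb 1

-- ===== PORT B =====
-- (lb - 1).bit_length() for lb - 1 ≥ 1 is Nat.log2 (lb-1) + 1; 1 << k is 2 ^ k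
def pow2geq_alt (lb : Int) : Int :=
  if lb ≤ 2 then 2 else (2:Int) ^ (Nat.log2 (lb - 1).toNat + 1)

-- ===== PRECONDITION & SPEC =====
def Spec_pow2geq (lb : Int) (out : Int) : Prop := out = pow2geq_alt lb
instance (lb : Int) (out : Int) : Decidable (Spec_pow2geq lb out) := by unfold Spec_pow2geq; infer_instance

-- ===== CLAIM (what is proved, stated in full; the proofs are below) =====
def Claim_equal_pow2geq : Prop := ∀ (lb : Int), Dom_pow2geq lb → Spec_pow2geq lb (pow2geq lb)

-- ===== LEMMAS AND PROOFS =====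

-- If lb ≤ 2^k and every smaller power of two is < lb, the loop started at any exp ≤ k returns 2^k.
theorem pow2geqLoop_char (lb : Int) (k : Nat) (hk : lb ≤ 2 ^ k)
    (hlt : ∀ e, e < k → (2:Int) ^ e < lb) :
    ∀ d exp, exp + d = k → pow2geqLoop lb exp = 2 ^ k := by
  intro d
  induction d with
  | zero =>
    intro exp h
    have : exp = k := by omega
    subst this
    unfold pow2geqLoop
    simp only [ge_iff_le, if_pos hk]
  | succ d ih =>
    intro exp h
    have hx : (2:Int) ^ exp < lb := hlt exp (by omega)
    unfold pow2geqLoop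
    simp only [ge_iff_le]
    rw [if_neg (by omega)]
    exact ih (exp + 1) (by omega)

theorem pow2geq_spec : Claim_equal_pow2geq := by
  intro lb _
  unfold Spec_pow2geq pow2geq pow2geq_alt
  by_cases hle : lb ≤ 2
  · rw [if_pos hle]
    unfold pow2geqLoop
    simp only [ge_iff_le]
    rw [if_pos (by norm_num; omega)]
    norm_num
  · rw [if_neg hle]
    push Not at hle
    set n : Nat := (lb - 1).toNat with hn
    have hncast : (n : Int) = lb - 1 := by omega
    have hn2 : 2 ≤ n := by omega
    set k : Nat := Nat.log2 n + 1 with hkdef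
    have hupN : n < 2 ^ k := Nat.lt_log2_self
    have hloN : 2 ^ Nat.log2 n ≤ n := Nat.log2_self_le (by omega)
    have hk : lb ≤ (2:Int) ^ k := by
      have : ((n : Int)) < ((2 ^ k : Nat) : Int) := by exact_mod_cast hupN
      push_cast at this
      omega
    have hlt : ∀ e, e < k → (2:Int) ^ e < lb := by
      intro e he
      have h1 : (2:Nat) ^ e ≤ 2 ^ Nat.log2 n :=
        Nat.pow_le_pow_right (by norm_num) (by omega)
      have h2 : ((2 ^ e : Nat) : Int) ≤ ((n : Int)) := by exact_mod_cast le_trans h1 hloN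
      push_cast at h2
      omega
    exact pow2geqLoop_char lb k hk hlt (k - 1) 1 (by omega)
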